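-- pv_equiv track=rewrite | github.com/mishrakeshav/Competitive-Programming | binarysearch.io/November 2020/413_selling_products.py | solve
-- ===== SOURCE A (Python) =====
-- def solve(items, n):
--     freq = dict()
--     for i in items:
--         if i not in freq:
--             freq[i] = 0
--         freq[i] += 1
--
--     counts = [freq[i] for i in freq]
--     counts.sort()
--     k = 0
--     for i in counts:
--         if i <= n:
--             k += 1
--             n -= i
--         else:
--             break
--     return len(counts) - k
-- ===== SOURCE B (Python) =====
-- def solve(items, n):
--     # Count-of-counts: bucket distinct items by their frequency value and
--     # consume whole buckets of equal frequency at once with a division,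
--     # instead of sorting the count list and removing items one by one.
--     freq = {}
--     for i in items:
--         freq[i] = freq.get(i, 0) + 1
--     buckets = {}
--     for c in freq.values():
--         buckets[c] = buckets.get(c, 0) + 1
--     distinct = len(freq)
--     consumed = 0
--     for v in sorted(buckets):
--         cnt = buckets[v]
--         if v > n:
--             break
--         take = min(cnt, n // v)
--         consumed += take
--         n -= take * v
--         if take < cnt:
--             break
--     return distinct - consumed
-- ===== Notes on version B (the rewrite author's own statement) =====
-- stated objective: alternative
-- what changed: Replaces A's sort of the full count list plus one-item-at-a-time greedy subtraction with a count-of-counts bucket table traversed over sorted distinct frequency values, consuming each equal-frequency batch at once via min(bucket, n // v).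
import Mathlib
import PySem

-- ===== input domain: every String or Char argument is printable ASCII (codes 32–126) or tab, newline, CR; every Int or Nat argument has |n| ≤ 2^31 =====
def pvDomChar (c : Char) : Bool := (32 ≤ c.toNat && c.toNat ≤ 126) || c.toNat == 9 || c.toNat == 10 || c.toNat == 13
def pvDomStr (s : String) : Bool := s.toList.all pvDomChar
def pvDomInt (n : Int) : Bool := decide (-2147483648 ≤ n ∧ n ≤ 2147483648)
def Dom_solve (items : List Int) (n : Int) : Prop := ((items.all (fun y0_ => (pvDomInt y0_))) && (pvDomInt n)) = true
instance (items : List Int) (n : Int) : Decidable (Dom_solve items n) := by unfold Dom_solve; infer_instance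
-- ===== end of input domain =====

-- B replaces A's sort-all-counts + one-item-at-a-time greedy with a count-of-counts
-- bucket table traversed over sorted distinct frequency values (alternative algorithm,
-- same return value).

-- ===== PORT A =====
def solve (items : List Int) (n : Int) : Int :=
  let freq := items.foldl (fun d i =>
      let d' := if d.contains i then d else d.insert i (0 : Int)
      d'.insert i (d'.getD i 0 + 1)) PySem.Dict.empty
  let counts := freq.keys.map (fun i => freq.getD i 0)
  let counts := PySem.List.sorted counts (fun x => x) false
  let s := counts.foldl (fun (s : Int × Int × Bool) i =>
      if s.2.2 then s
      else if i ≤ s.2.1 then (s.1 + 1, s.2.1 - i, false)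
      else (s.1, s.2.1, true)) (0, n, false)
  (counts.length : Int) - s.1

-- ===== PORT B =====
def solve_alt (items : List Int) (n : Int) : Int :=
  let freq := items.foldl (fun d i => d.insert i (d.getD i 0 + 1)) PySem.Dict.empty
  let buckets := freq.values.foldl (fun d c => d.insert c (d.getD c 0 + 1)) PySem.Dict.empty
  let distinct : Int := freq.size
  let s := (PySem.List.sorted buckets.keys (fun x => x) false).foldl
      (fun (s : Int × Int × Bool) v =>
        if s.2.2 then s
        else
          let cnt := buckets.getD v 0
          if s.2.1 < v then (s.1, s.2.1, true)
          else
            let take := min cnt (PySem.Int.floordiv s.2.1 v)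
            (s.1 + take, s.2.1 - take * v, decide (take < cnt))) (0, n, false)
  distinct - s.1

-- ===== PRECONDITION & SPEC =====
def Spec_solve (items : List Int) (n : Int) (out : Int) : Prop := out = solve_alt items n
instance (items : List Int) (n : Int) (out : Int) : Decidable (Spec_solve items n out) := by unfold Spec_solve; infer_instance

-- ===== CLAIM (what is proved, stated in full; the proofs are below) =====
def Claim_equal_solve : Prop := ∀ (items : List Int) (n : Int), Dom_solve items n → Spec_solve items n (solve items n)

-- ===== LEMMAS AND PROOFS =====

-- A's greedy scan over the sorted count list, as a recursion.
def greedy : List Int → Int → Int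
  | [], _ => 0
  | i :: rest, n => if i ≤ n then 1 + greedy rest (n - i) else 0

-- B's batched pass over sorted distinct frequency values, as a recursion.
def batch (c : Int → Int) : List Int → Int → Int
  | [], _ => 0
  | v :: ks, n =>
    if n < v then 0
    else
      if min (c v) (PySem.Int.floordiv n v) < c v
      then min (c v) (PySem.Int.floordiv n v)
      else min (c v) (PySem.Int.floordiv n v) +
             batch c ks (n - min (c v) (PySem.Int.floordiv n v) * v)

theorem insert_insert_self {κ ν : Type} [BEq κ] [LawfulBEq κ]
    (d : PySem.Dict κ ν) (k : κ) (v w : ν) :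
    (d.insert k v).insert k w = d.insert k w := by
  apply PySem.Dict.ext
  by_cases h : d.contains k = true
  · rw [PySem.Dict.items_insert_of_contains _ w (PySem.Dict.contains_insert_self d k v),
        PySem.Dict.items_insert_of_contains _ v h,
        PySem.Dict.items_insert_of_contains _ w h, List.map_map]
    apply List.map_congr_left
    intro p _
    by_cases hpk : (p.1 == k) = true
    · simp [Function.comp, hpk]
    · simp [Function.comp, hpk]
  · have hf : d.contains k = false := by
      cases hc : d.contains k
      · rfl
      · exact absurd hc h
    rw [PySem.Dict.items_insert_of_contains _ w (PySem.Dict.contains_insert_self d k v),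
        PySem.Dict.items_insert_of_not_contains _ v hf,
        PySem.Dict.items_insert_of_not_contains _ w hf, List.map_append]
    congr 1
    · conv_rhs => rw [← List.map_id d.items]
      apply List.map_congr_left
      intro p hp
      have hne : (p.1 == k) ≠ true := by
        intro hb
        have : p.1 ∈ d.keys := PySem.Dict.mem_keys_of_mem_items d hp
        rw [eq_of_beq hb] at this
        rw [((PySem.Dict.contains_iff_mem_keys d k).mpr this)] at hf
        cases hf
      simp [hne]
    · simp

theorem stepA_eq (d : PySem.Dict Int Int) (i : Int) :
    (let d' := if d.contains i then d else d.insert i (0 : Int)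
     d'.insert i (d'.getD i 0 + 1)) = d.insert i (d.getD i 0 + 1) := by
  by_cases h : d.contains i = true
  · simp only [h, if_true]
  · have hf : d.contains i = false := by
      cases hc : d.contains i
      · rfl
      · exact absurd hc h
    simp only [hf, Bool.false_eq_true, if_false]
    rw [PySem.Dict.getD_insert_self, insert_insert_self,
        PySem.Dict.getD_of_not_contains d 0 hf]

def stepA (s : Int × Int × Bool) (i : Int) : Int × Int × Bool :=
  if s.2.2 then s
  else if i ≤ s.2.1 then (s.1 + 1, s.2.1 - i, false)
  else (s.1, s.2.1, true)

def stepB (buckets : PySem.Dict Int Int) (s : Int × Int × Bool) (v : Int) : Int × Int × Bool :=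
  if s.2.2 then s
  else
    let cnt := buckets.getD v 0
    if s.2.1 < v then (s.1, s.2.1, true)
    else
      let take := min cnt (PySem.Int.floordiv s.2.1 v)
      (s.1 + take, s.2.1 - take * v, decide (take < cnt))

theorem foldA_stop (l : List Int) (k n : Int) :
    l.foldl stepA (k, n, true) = (k, n, true) := by
  induction l with
  | nil => rfl
  | cons i t ih =>
    rw [List.foldl_cons, show stepA (k, n, true) i = (k, n, true) from rfl, ih]

theorem foldA (l : List Int) : ∀ k n : Int,
    (l.foldl stepA (k, n, false)).1 = k + greedy l n := by
  induction l with
  | nil => intro k n; simp [greedy]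
  | cons i t ih =>
    intro k n
    rw [List.foldl_cons]
    by_cases h : i ≤ n
    · rw [show stepA (k, n, false) i = (k + 1, n - i, false) by simp [stepA, h]]
      rw [ih]; simp [greedy, h]; ring
    · rw [show stepA (k, n, false) i = (k, n, true) by simp [stepA, h]]
      rw [foldA_stop]; simp [greedy, h]

theorem foldB_stop (buckets : PySem.Dict Int Int) (l : List Int) (k n : Int) :
    l.foldl (stepB buckets) (k, n, true) = (k, n, true) := by
  induction l with
  | nil => rfl
  | cons v t ih =>
    rw [List.foldl_cons, show stepB buckets (k, n, true) v = (k, n, true) from rfl, ih]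

theorem foldB (buckets : PySem.Dict Int Int) (l : List Int) : ∀ k n : Int,
    (l.foldl (stepB buckets) (k, n, false)).1
      = k + batch (fun v => buckets.getD v 0) l n := by
  induction l with
  | nil => intro k n; simp [batch]
  | cons v t ih =>
    intro k n
    rw [List.foldl_cons]
    by_cases h : n < v
    · rw [show stepB buckets (k, n, false) v = (k, n, true) by
        simp [stepB, show ¬ ¬ n < v from not_not_intro h]]
      rw [foldB_stop]; simp [batch, h]
    · by_cases h2 : min (buckets.getD v 0) (PySem.Int.floordiv n v) < buckets.getD v 0
      · rw [show stepB buckets (k, n, false) v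
            = (k + min (buckets.getD v 0) (PySem.Int.floordiv n v),
               n - min (buckets.getD v 0) (PySem.Int.floordiv n v) * v, true) by
          simp [stepB, h, h2]]
        rw [foldB_stop]; simp [batch, h, h2]
      · rw [show stepB buckets (k, n, false) v
            = (k + min (buckets.getD v 0) (PySem.Int.floordiv n v),
               n - min (buckets.getD v 0) (PySem.Int.floordiv n v) * v, false) by
          simp [stepB, h, h2]]
        rw [ih]
        simp [batch, h, h2]; ring

theorem batch_congr (c₁ c₂ : Int → Int) (ks : List Int)
    (h : ∀ v ∈ ks, c₁ v = c₂ v) : ∀ n, batch c₁ ks n = batch c₂ ks n := by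
  induction ks with
  | nil => intro n; rfl
  | cons v t ih =>
    intro n
    have hv : c₁ v = c₂ v := h v (by simp)
    simp only [batch, hv]
    rw [ih (fun w hw => h w (by simp [hw]))]

theorem greedy_replicate (v : Int) (hv : 0 < v) (rest : List Int) :
    ∀ (c : Nat), 1 ≤ c → ∀ n : Int,
    greedy (List.replicate c v ++ rest) n =
      if n < v then 0
      else
        if min (c : Int) (PySem.Int.floordiv n v) < (c : Int)
        then min (c : Int) (PySem.Int.floordiv n v)
        else min (c : Int) (PySem.Int.floordiv n v) +
               greedy rest (n - min (c : Int) (PySem.Int.floordiv n v) * v) := by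
  intro c
  induction c with
  | zero => intro h; omega
  | succ c ih =>
    intro _ n
    rcases Nat.eq_zero_or_pos c with h0 | h1
    · -- c + 1 = 1 : single element
      subst h0
      by_cases hn : n < v
      · simp [greedy, hn, show ¬ v ≤ n by omega]
      · have hq1 : 1 ≤ PySem.Int.floordiv n v := by
          rw [PySem.Int.le_floordiv_iff_mul_le hv]; omega
        have hmin : min ((1 : Nat) : Int) (PySem.Int.floordiv n v) = 1 := by
          simp; omega
        simp only [List.replicate, List.cons_append, List.nil_append, greedy]
        rw [if_neg hn, if_pos (show v ≤ n by omega)]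
        push_cast at hmin ⊢
        rw [hmin]
        simp
    · by_cases hn : n < v
      · simp [greedy, hn, show ¬ v ≤ n by omega, List.replicate_succ]
      · have hvn : v ≤ n := by omega
        set q := PySem.Int.floordiv n v with hqdef
        have hq1 : 1 ≤ q := by rw [hqdef, PySem.Int.le_floordiv_iff_mul_le hv]; omega
        have hb1 : q * v ≤ n := by
          rw [hqdef]; exact (PySem.Int.le_floordiv_iff_mul_le hv).mp le_rfl
        have hb2 : n < (q + 1) * v := by
          rw [hqdef]; exact (PySem.Int.floordiv_lt_iff_lt_mul hv).mp (by omega)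
        have hq' : PySem.Int.floordiv (n - v) v = q - 1 := by
          rw [PySem.Int.floordiv_eq_iff_of_pos hv]
          constructor
          · nlinarith
          · nlinarith
        rw [List.replicate_succ, List.cons_append]
        show (if v ≤ n then 1 + greedy (List.replicate c v ++ rest) (n - v) else 0) = _
        rw [if_pos hvn, ih h1 (n - v), hq']
        by_cases h2 : n - v < v
        · have hq2 : q = 1 := by nlinarith
          rw [if_pos h2, if_neg hn]
          have : min ((↑(c + 1) : Int)) q = 1 := by push_cast; omega
          rw [this, if_pos (by push_cast; omega)]
          omega
        · have hq2 : 2 ≤ q := by nlinarith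
          rw [if_neg h2, if_neg hn]
          have hmm : min ((↑(c + 1) : Int)) q = min (↑c : Int) (q - 1) + 1 := by
            push_cast; omega
          rw [hmm]
          set t' := min (↑c : Int) (q - 1) with ht'
          have harg : n - v - t' * v = n - (t' + 1) * v := by ring
          by_cases h3 : t' < (c : Int)
          · rw [if_pos h3, if_pos (by push_cast; omega)]; omega
          · rw [if_neg h3, if_neg (by push_cast; omega), harg]
            omega

theorem greedy_flatMap (vals : List Int) (hpos : ∀ x ∈ vals, 0 < x) :
    ∀ (ks : List Int), (∀ v ∈ ks, v ∈ vals) → ∀ n : Int,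
    greedy (ks.flatMap (fun v => List.replicate (vals.count v) v)) n
      = batch (fun v => (vals.count v : Int)) ks n := by
  intro ks
  induction ks with
  | nil => intro _ n; simp [greedy, batch]
  | cons v t ih =>
    intro h n
    have hvv : v ∈ vals := h v (by simp)
    have hc : 1 ≤ vals.count v := List.count_pos_iff.mpr hvv
    rw [List.flatMap_cons]
    rw [greedy_replicate v (hpos v hvv) _ (vals.count v) hc n]
    simp only [batch]
    by_cases hn : n < v
    · rw [if_pos hn, if_pos hn]
    · rw [if_neg hn, if_neg hn]
      by_cases h2 : min ((vals.count v : Int)) (PySem.Int.floordiv n v) < (vals.count v : Int)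
      · rw [if_pos h2, if_pos h2]
      · rw [if_neg h2, if_neg h2, ih (fun w hw => h w (by simp [hw]))]

theorem count_flatMap_replicate (vals : List Int) :
    ∀ (ks : List Int), ks.Nodup → (∀ v ∈ ks, v ∈ vals) → ∀ x : Int,
    (ks.flatMap (fun v => List.replicate (vals.count v) v)).count x
      = if x ∈ ks then vals.count x else 0 := by
  intro ks
  induction ks with
  | nil => simp
  | cons v t ih =>
    intro hnd hmem x
    have hvt : v ∉ t := (List.nodup_cons.mp hnd).1
    rw [List.flatMap_cons, List.count_append, List.count_replicate,
        ih (List.nodup_cons.mp hnd).2 (fun w hw => hmem w (by simp [hw])) x]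
    by_cases hxv : x = v
    · subst hxv
      simp [hvt]
    · simp [hxv, List.mem_cons]
      intro h
      exact absurd h.symm hxv

theorem flatMap_perm (vals ks : List Int) (hnd : ks.Nodup)
    (hmem : ∀ x, x ∈ ks ↔ x ∈ vals) :
    (ks.flatMap (fun v => List.replicate (vals.count v) v)).Perm vals := by
  rw [List.perm_iff_count]
  intro x
  rw [count_flatMap_replicate vals ks hnd (fun v hv => (hmem v).mp hv) x]
  by_cases hx : x ∈ vals
  · rw [if_pos ((hmem x).mpr hx)]
  · rw [if_neg (fun hk => hx ((hmem x).mp hk)), Eq.symm (List.count_eq_zero.mpr hx)]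

theorem flatMap_pairwise (vals : List Int) :
    ∀ (ks : List Int), ks.Pairwise (· < ·) →
    (ks.flatMap (fun v => List.replicate (vals.count v) v)).Pairwise (· ≤ ·) := by
  intro ks
  induction ks with
  | nil => simp
  | cons v t ih =>
    intro hp
    rw [List.flatMap_cons]
    apply List.pairwise_append.mpr
    refine ⟨?_, ih hp.of_cons, ?_⟩
    · apply List.pairwise_replicate.mpr
      simp
    · intro x hx y hy
      have hxv : x = v := List.eq_of_mem_replicate hx
      obtain ⟨k, hk, hyk⟩ := List.mem_flatMap.mp hy
      have hyv : y = k := List.eq_of_mem_replicate hyk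
      have := List.rel_of_pairwise_cons hp hk
      omega

theorem sorted_eq_flatMap (vals : List Int) :
    PySem.List.sorted vals (fun x => x) false
      = (PySem.List.sorted (PySem.Set.ofList vals) (fun x => x) false).flatMap
          (fun v => List.replicate (vals.count v) v) := by
  have hnd : (PySem.List.sorted (PySem.Set.ofList vals) (fun x => x) false).Nodup :=
    (PySem.List.sorted_perm (PySem.Set.ofList vals) (fun x => x) false).symm.nodup
      (PySem.Set.nodup_ofList vals)
  have hmem : ∀ x, x ∈ PySem.List.sorted (PySem.Set.ofList vals) (fun x => x) false ↔ x ∈ vals := by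
    intro x
    rw [PySem.List.mem_sorted, PySem.Set.mem_ofList]
  apply PySem.List.eq_of_perm_of_pairwise_le_of_injective (key := fun x => x)
    (fun a b hab => hab)
  · exact ((flatMap_perm vals _ hnd hmem).trans
      (PySem.List.sorted_perm vals (fun x => x) false).symm).symm
  · exact PySem.List.sorted_pairwise vals (fun x => x)
  · exact flatMap_pairwise vals _ (PySem.List.sorted_ofList_pairwise_lt vals)

theorem greedy_sorted_eq_batch (vals : List Int) (hpos : ∀ x ∈ vals, 0 < x) (n : Int) :
    greedy (PySem.List.sorted vals (fun x => x) false) n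
      = batch (fun v => (vals.count v : Int))
          (PySem.List.sorted (PySem.Set.ofList vals) (fun x => x) false) n := by
  rw [sorted_eq_flatMap]
  exact greedy_flatMap vals hpos _
    (fun v hv => (PySem.Set.mem_ofList _ _).mp ((PySem.List.mem_sorted _ _ _ _).mp hv)) n

-- ===== VERDICT (by name: the statement is the Claim_ definition above) =====
theorem solve_spec : Claim_equal_solve := by
  intro items n _
  unfold Spec_solve
  have hfreqA : items.foldl (fun d i =>
      let d' := if d.contains i then d else d.insert i (0 : Int)
      d'.insert i (d'.getD i 0 + 1)) PySem.Dict.empty = PySem.Dict.counter items := by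
    rw [PySem.List.foldl_congr_mem items _ (fun d i => d.insert i (d.getD i 0 + 1))
        PySem.Dict.empty (fun acc x _ => stepA_eq acc x)]
    exact PySem.Dict.foldl_insert_getD_add_one_eq_counter items
  have hfreqB : items.foldl (fun d i => d.insert i (d.getD i 0 + 1)) PySem.Dict.empty
      = PySem.Dict.counter items := PySem.Dict.foldl_insert_getD_add_one_eq_counter items
  have hvalsB : (PySem.Dict.counter items).values
      = (PySem.Set.ofList items).map (fun k => ((List.count k items : Nat) : Int)) := by
    show ((PySem.Dict.counter items).items.map (fun x => x.2)) = _
    rw [PySem.Dict.items_counter, List.map_map]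
    rfl
  have hcountsA : (PySem.Dict.counter items).keys.map (fun i => (PySem.Dict.counter items).getD i 0)
      = (PySem.Set.ofList items).map (fun k => ((List.count k items : Nat) : Int)) := by
    rw [PySem.Dict.keys_counter]
    exact List.map_congr_left (fun k _ => PySem.Dict.getD_counter items k)
  set vals := (PySem.Set.ofList items).map (fun k => ((List.count k items : Nat) : Int)) with hvalsdef
  have hpos : ∀ x ∈ vals, 0 < x := by
    intro x hx
    obtain ⟨k, hk, rfl⟩ := List.mem_map.mp hx
    have hki : k ∈ items := (PySem.Set.mem_ofList _ _).mp hk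
    have : 0 < List.count k items := List.count_pos_iff.mpr hki
    exact_mod_cast this
  have hsize : (PySem.Dict.counter items).size = vals.length := by
    show (PySem.Dict.counter items).items.length = _
    rw [PySem.Dict.items_counter, hvalsdef]
    simp
  have hA : solve items n = (vals.length : Int)
      - greedy (PySem.List.sorted vals (fun x => x) false) n := by
    simp only [solve]
    rw [hfreqA, hcountsA]
    rw [show (fun (s : Int × Int × Bool) i =>
        if s.2.2 then s
        else if i ≤ s.2.1 then (s.1 + 1, s.2.1 - i, false)
        else (s.1, s.2.1, true)) = stepA from rfl]
    rw [foldA, PySem.List.length_sorted]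
    omega
  have hB : solve_alt items n = (vals.length : Int)
      - batch (fun v => ((List.count v vals : Nat) : Int))
          (PySem.List.sorted (PySem.Set.ofList vals) (fun x => x) false) n := by
    simp only [solve_alt]
    rw [hfreqB, hvalsB]
    rw [show vals.foldl (fun d c => d.insert c (d.getD c 0 + 1)) PySem.Dict.empty
        = PySem.Dict.counter vals from PySem.Dict.foldl_insert_getD_add_one_eq_counter vals]
    rw [PySem.Dict.keys_counter]
    rw [show (fun (s : Int × Int × Bool) v =>
        if s.2.2 then s
        else
          let cnt := (PySem.Dict.counter vals).getD v 0
          if s.2.1 < v then (s.1, s.2.1, true)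
          else
            let take := min cnt (PySem.Int.floordiv s.2.1 v)
            (s.1 + take, s.2.1 - take * v, decide (take < cnt)))
        = stepB (PySem.Dict.counter vals) from rfl]
    rw [foldB, batch_congr (fun v => (PySem.Dict.counter vals).getD v 0)
        (fun v => ((List.count v vals : Nat) : Int)) _
        (fun v _ => PySem.Dict.getD_counter vals v) n]
    rw [hsize]
    omega
  rw [hA, hB, greedy_sorted_eq_batch vals hpos n]
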